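-- pv_equiv track=rewrite | github.com/ankul-in/Two-years | KATA195.py | farthest_empty_index
-- ===== SOURCE A (Python) =====
-- def farthest_empty_index(arr):
--     occupied = [i for i, val in enumerate(arr) if val is not None]
--     empty = [i for i, val in enumerate(arr) if val is None]
--     if not empty or not occupied:
--         return 0
--     max_distance = -1
--     best_index = None
--     for e in empty:
--         min_dist = min(abs(e - o) for o in occupied)
--         if min_dist > max_distance:
--             max_distance = min_dist
--             best_index = e
--     return best_index
-- ===== SOURCE B (Python) =====
-- def farthest_empty_index(arr):
--     # Two-pass nearest-occupied distances, then one scan over empties (O(n) vs A's O(n^2)).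
--     n = len(arr)
--     if all(v is None for v in arr) or all(v is not None for v in arr):
--         return 0
--     left = []
--     last = -1
--     for i, v in enumerate(arr):
--         if v is not None:
--             last = i
--         left.append(i - last if last >= 0 else n)
--     right = [0] * n
--     last = -1
--     for i in range(n - 1, -1, -1):
--         if arr[i] is not None:
--             last = i
--         right[i] = (last - i) if last >= 0 else n
--     best_d, best_i = -1, 0
--     for i, v in enumerate(arr):
--         if v is None:
--             d = min(left[i], right[i])
--             if d > best_d:
--                 best_d, best_i = d, i
--     return best_i
-- ===== Notes on version B (the rewrite author's own statement) =====
-- stated objective: faster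
-- what changed: A computes, for every empty index, the minimum distance to every occupied index (nested scans); B precomputes nearest-occupied distances with one forward and one backward pass and then picks the best empty index in a single scan.
import Mathlib
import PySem

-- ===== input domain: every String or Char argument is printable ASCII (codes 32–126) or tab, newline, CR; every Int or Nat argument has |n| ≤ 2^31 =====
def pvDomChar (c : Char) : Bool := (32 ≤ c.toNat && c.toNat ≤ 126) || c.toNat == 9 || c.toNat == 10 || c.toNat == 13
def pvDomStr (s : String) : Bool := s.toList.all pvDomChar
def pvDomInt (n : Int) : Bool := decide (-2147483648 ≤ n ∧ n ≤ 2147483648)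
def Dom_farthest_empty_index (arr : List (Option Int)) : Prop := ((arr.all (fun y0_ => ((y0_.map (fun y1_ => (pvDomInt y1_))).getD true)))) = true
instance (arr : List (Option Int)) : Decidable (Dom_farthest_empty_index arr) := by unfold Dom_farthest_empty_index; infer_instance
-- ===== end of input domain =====

-- B replaces A's per-empty scan of all occupied indices (quadratic) by two linear
-- nearest-occupied-distance passes and a single scan over the empty indices.

-- ===== PORT A =====
def farthest_empty_index (arr : List (Option Int)) : Int :=
  let occupied := ((PySem.List.enumerate arr).filter (fun p => p.2.isSome)).map (fun p => p.1)
  let empty := ((PySem.List.enumerate arr).filter (fun p => p.2.isNone)).map (fun p => p.1)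
  if empty.isEmpty || occupied.isEmpty then 0
  else
    let r := empty.foldl (fun (s : Int × Option Int) e =>
      match PySem.List.min? (occupied.map (fun o => |e - o|)) (fun x => x) with
      | some min_dist => if min_dist > s.1 then (min_dist, some e) else s
      | none => s) ((-1 : Int), (none : Option Int))
    match r.2 with
    | some b => b
    | none => 0

-- ===== PORT B =====
-- left pass of Source B: walking forward, `last` = last occupied index seen (-1 if none)
def pvLeftScan (n : Int) : List (Option Int) → Int → Int → List Int
  | [], _, _ => []
  | v :: rest, i, last =>
    let last' := if v.isSome then i else last
    (if 0 ≤ last' then i - last' else n) :: pvLeftScan n rest (i + 1) last'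

-- right pass of Source B (a reversed for-loop): returns the distance list and the final `last`
def pvRightScan (n : Int) : List (Option Int) → Int → List Int × Int
  | [], _ => ([], -1)
  | v :: rest, i =>
    let p := pvRightScan n rest (i + 1)
    let last' := if v.isSome then i else p.2
    ((if 0 ≤ last' then last' - i else n) :: p.1, last')

-- final pass of Source B: best (distance, index) over empty slots
def pvPick : List (Option Int) → List Int → List Int → Int → Int × Int → Int × Int
  | v :: vs, l :: ls, r :: rs, i, s =>
    pvPick vs ls rs (i + 1)
      (if v.isNone then (if min l r > s.1 then (min l r, i) else s) else s)
  | _, _, _, _, s => s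

def farthest_empty_index_alt (arr : List (Option Int)) : Int :=
  let n : Int := arr.length
  if arr.all (fun v => v.isNone) || arr.all (fun v => v.isSome) then 0
  else
    let left := pvLeftScan n arr 0 (-1)
    let right := (pvRightScan n arr 0).1
    (pvPick arr left right 0 (-1, 0)).2

-- ===== PRECONDITION & SPEC =====
def Spec_farthest_empty_index (arr : List (Option Int)) (out : Int) : Prop := out = farthest_empty_index_alt arr
instance (arr : List (Option Int)) (out : Int) : Decidable (Spec_farthest_empty_index arr out) := by unfold Spec_farthest_empty_index; infer_instance

-- ===== CLAIM (what is proved, stated in full; the proofs are below) =====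
def Claim_equal_farthest_empty_index : Prop := ∀ (arr : List (Option Int)), Dom_farthest_empty_index arr → Spec_farthest_empty_index arr (farthest_empty_index arr)

-- ===== LEMMAS AND PROOFS =====

theorem pvLeftScan_length (n : Int) : ∀ (l : List (Option Int)) (i last : Int),
    (pvLeftScan n l i last).length = l.length := by
  intro l; induction l with
  | nil => intro i last; rfl
  | cons v rest ih => intro i last; simp [pvLeftScan, ih]

theorem pvLeftScan_bound (n : Int) : ∀ (l : List (Option Int)) (i last : Int), 0 ≤ last → last < i →
    ∀ (k : Nat) (hk : k < l.length),
    (pvLeftScan n l i last)[k]'(by rw [pvLeftScan_length]; exact hk) ≤ i + (k : Int) - last := by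
  intro l
  induction l with
  | nil => intro i last _ _ k hk; simp at hk
  | cons v rest ih =>
    intro i last h0 hi k hk
    cases k with
    | zero =>
      simp only [pvLeftScan]
      by_cases hv : v.isSome <;> simp [hv] <;> omega
    | succ k =>
      simp only [pvLeftScan, List.getElem_cons_succ]
      by_cases hv : v.isSome
      · have := ih (i+1) i (by omega) (by omega) k (by simpa using hk)
        simp [hv] at *
        omega
      · have := ih (i+1) last h0 (by omega) k (by simpa using hk)
        simp [hv] at *
        omega

theorem pvLeftScan_le (n : Int) : ∀ (l : List (Option Int)) (i last : Int), 0 ≤ i → last < i →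
    ∀ (k j : Nat) (hk : k < l.length) (hj : j < l.length), j ≤ k → (l[j]).isSome →
    (pvLeftScan n l i last)[k]'(by rw [pvLeftScan_length]; exact hk) ≤ (k : Int) - (j : Int) := by
  intro l
  induction l with
  | nil => intro i last _ _ k j hk; simp at hk
  | cons v rest ih =>
    intro i last h0 hi k j hk hj hjk hs
    cases k with
    | zero =>
      interval_cases j
      simp only [List.getElem_cons_zero] at hs
      simp [pvLeftScan, hs, h0]
    | succ k =>
      simp only [pvLeftScan, List.getElem_cons_succ]
      cases j with
      | zero =>
        simp only [List.getElem_cons_zero] at hs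
        have := pvLeftScan_bound n rest (i+1) i h0 (by omega) k (by simpa using hk)
        simp [hs]
        omega
      | succ j =>
        have := ih (i+1) (if v.isSome then i else last) (by omega) (by split <;> omega) k j (by simpa using hk) (by simpa using hj) (by omega) (by simpa using hs)
        simp at this ⊢
        omega

theorem pvLeftScan_mem (n : Int) : ∀ (l : List (Option Int)) (i last : Int), last < i → 0 ≤ i →
    ∀ (k : Nat) (hk : k < l.length),
    (∃ (j : Nat) (hj : j < l.length), j ≤ k ∧ (l[j]).isSome ∧
        (pvLeftScan n l i last)[k]'(by rw [pvLeftScan_length]; exact hk) = (k : Int) - (j : Int)) ∨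
    ((pvLeftScan n l i last)[k]'(by rw [pvLeftScan_length]; exact hk) = if 0 ≤ last then i + (k : Int) - last else n) := by
  intro l
  induction l with
  | nil => intro i last _ _ k hk; simp at hk
  | cons v rest ih =>
    intro i last hi h0 k hk
    cases k with
    | zero =>
      by_cases hv : v.isSome
      · left; exact ⟨0, by simp, le_refl 0, by simpa using hv, by simp [pvLeftScan, hv, h0]⟩
      · right; simp [pvLeftScan, hv]
    | succ k =>
      have hrec := ih (i+1) (if v.isSome then i else last) (by split <;> omega) (by omega) k (by simpa using hk)
      simp only [pvLeftScan, List.getElem_cons_succ]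
      rcases hrec with ⟨j, hj, hjk, hsome, heq⟩ | heq
      · left
        exact ⟨j+1, by simpa using hj, by omega, by simpa using hsome, by rw [heq]; push_cast; ring⟩
      · by_cases hv : v.isSome
        · left
          refine ⟨0, by simp, by omega, by simpa using hv, ?_⟩
          simp only [hv, if_true] at heq ⊢
          rw [heq]; push_cast; omega
        · right
          simp only [hv, Bool.false_eq_true, if_false] at heq ⊢
          split at heq
          · rw [heq]; simp [*]; omega
          · rw [heq]; simp [*]

theorem pvRightScan_length (n : Int) : ∀ (l : List (Option Int)) (i : Int),
    ((pvRightScan n l i).1).length = l.length := by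
  intro l; induction l with
  | nil => intro i; rfl
  | cons v rest ih => intro i; simp [pvRightScan, ih]

theorem pvRightScan_snd_le (n : Int) : ∀ (l : List (Option Int)) (i : Int), 0 ≤ i →
    ∀ (j : Nat) (hj : j < l.length), (l[j]).isSome →
    0 ≤ (pvRightScan n l i).2 ∧ (pvRightScan n l i).2 ≤ i + (j : Int) := by
  intro l
  induction l with
  | nil => intro i _ j hj; simp at hj
  | cons v rest ih =>
    intro i h0 j hj hs
    by_cases hv : v.isSome
    · simp [pvRightScan, hv]; omega
    · cases j with
      | zero => simp only [List.getElem_cons_zero] at hs; simp [hs] at hv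
      | succ j =>
        have := ih (i+1) (by omega) j (by simpa using hj) (by simpa using hs)
        simp [pvRightScan, hv]
        push_cast
        omega

theorem pvRightScan_snd_mem (n : Int) : ∀ (l : List (Option Int)) (i : Int),
    (pvRightScan n l i).2 = -1 ∨
    ∃ (j : Nat) (hj : j < l.length), (l[j]).isSome ∧ (pvRightScan n l i).2 = i + (j : Int) := by
  intro l
  induction l with
  | nil => intro i; left; rfl
  | cons v rest ih =>
    intro i
    by_cases hv : v.isSome
    · right; exact ⟨0, by simp, by simpa using hv, by simp [pvRightScan, hv]⟩
    · rcases ih (i+1) with h | ⟨j, hj, hs, h⟩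
      · left; simp [pvRightScan, hv, h]
      · right
        refine ⟨j+1, by simpa using hj, by simpa using hs, ?_⟩
        simp [pvRightScan, hv, h]; push_cast; ring

theorem pvRightScan_le (n : Int) : ∀ (l : List (Option Int)) (i : Int), 0 ≤ i →
    ∀ (k j : Nat) (hk : k < l.length) (hj : j < l.length), k ≤ j → (l[j]).isSome →
    ((pvRightScan n l i).1)[k]'(by rw [pvRightScan_length]; exact hk) ≤ (j : Int) - (k : Int) := by
  intro l
  induction l with
  | nil => intro i _ k j hk; simp at hk
  | cons v rest ih =>
    intro i h0 k j hk hj hkj hs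
    cases k with
    | zero =>
      by_cases hv : v.isSome
      · simp [pvRightScan, hv]; omega
      · cases j with
        | zero => simp only [List.getElem_cons_zero] at hs; simp [hs] at hv
        | succ j =>
          have := pvRightScan_snd_le n rest (i+1) (by omega) j (by simpa using hj) (by simpa using hs)
          simp [pvRightScan, hv]
          split <;> push_cast <;> omega
    | succ k =>
      cases j with
      | zero => omega
      | succ j =>
        have := ih (i+1) (by omega) k j (by simpa using hk) (by simpa using hj) (by omega) (by simpa using hs)
        simp only [pvRightScan, List.getElem_cons_succ] at *
        push_cast at *
        omega

theorem pvRightScan_mem (n : Int) : ∀ (l : List (Option Int)) (i : Int), 0 ≤ i →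
    ∀ (k : Nat) (hk : k < l.length),
    (∃ (j : Nat) (hj : j < l.length), k ≤ j ∧ (l[j]).isSome ∧
        ((pvRightScan n l i).1)[k]'(by rw [pvRightScan_length]; exact hk) = (j : Int) - (k : Int)) ∨
    ((pvRightScan n l i).1)[k]'(by rw [pvRightScan_length]; exact hk) = n := by
  intro l
  induction l with
  | nil => intro i _ k hk; simp at hk
  | cons v rest ih =>
    intro i h0 k hk
    cases k with
    | zero =>
      by_cases hv : v.isSome
      · left; exact ⟨0, by simp, le_refl 0, by simpa using hv, by simp [pvRightScan, hv, h0]⟩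
      · rcases pvRightScan_snd_mem n rest (i+1) with h | ⟨j, hj, hs, h⟩
        · right; simp [pvRightScan, hv, h]
        · left
          refine ⟨j+1, by simpa using hj, by omega, by simpa using hs, ?_⟩
          simp [pvRightScan, hv, h]
          split <;> push_cast <;> omega
    | succ k =>
      rcases ih (i+1) (by omega) k (by simpa using hk) with ⟨j, hj, hkj, hs, h⟩ | h
      · left
        refine ⟨j+1, by simpa using hj, by omega, by simpa using hs, ?_⟩
        simp only [pvRightScan, List.getElem_cons_succ]
        rw [h]; push_cast; ring
      · right
        simp only [pvRightScan, List.getElem_cons_succ]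
        exact h

theorem min?_id_unique (xs : List Int) (m : Int) (hm : m ∈ xs) (hle : ∀ x ∈ xs, m ≤ x) :
    PySem.List.min? xs (fun x => x) = some m := by
  rcases h : PySem.List.min? xs (fun x => x) with _ | m'
  · rw [PySem.List.min?_eq_none_iff] at h
    subst h; simp at hm
  · have h1 := PySem.List.min?_mem h
    have h2 := PySem.List.min?_isMin h m hm
    have h3 := hle m' h1
    simp only [] at h2
    exact congrArg some (le_antisymm h2 h3)

theorem mem_occ_iff (arr : List (Option Int)) (o : Int) :
    o ∈ ((PySem.List.enumerate arr).filter (fun p => p.2.isSome)).map (fun p => p.1) ↔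
    ∃ (j : Nat) (hj : j < arr.length), (arr[j]).isSome ∧ o = (j : Int) := by
  simp only [List.mem_map, List.mem_filter]
  constructor
  · rintro ⟨p, ⟨hp, hs⟩, rfl⟩
    rw [PySem.List.mem_enumerate_iff] at hp
    obtain ⟨k, hk, rfl⟩ := hp
    exact ⟨k, hk, by simpa using hs, by simp⟩
  · rintro ⟨j, hj, hs, rfl⟩
    refine ⟨((j : Int), arr[j]), ⟨?_, by simpa using hs⟩, rfl⟩
    rw [PySem.List.mem_enumerate_iff]
    exact ⟨j, hj, by simp⟩

-- the crux: min(left[k], right[k]) is exactly A's min over |k - o| for occupied o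
theorem mind_eq (arr : List (Option Int)) (k : Nat) (hk : k < arr.length)
    (j0 : Nat) (hj0 : j0 < arr.length) (hocc : (arr[j0]).isSome) :
    PySem.List.min? (((((PySem.List.enumerate arr).filter (fun p => p.2.isSome)).map (fun p => p.1)).map (fun o => |(k : Int) - o|)) ) (fun x => x)
      = some (min ((pvLeftScan (arr.length) arr 0 (-1))[k]'(by rw [pvLeftScan_length]; exact hk))
                  (((pvRightScan (arr.length) arr 0).1)[k]'(by rw [pvRightScan_length]; exact hk))) := by
  set L := (pvLeftScan (arr.length) arr 0 (-1))[k]'(by rw [pvLeftScan_length]; exact hk) with hL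
  set R := ((pvRightScan (arr.length) arr 0).1)[k]'(by rw [pvRightScan_length]; exact hk) with hR
  apply min?_id_unique
  · -- membership: min L R is achieved at some occupied index
    have hmemL := pvLeftScan_mem (arr.length) arr 0 (-1) (by omega) (by omega) k hk
    have hmemR := pvRightScan_mem (arr.length) arr 0 (by omega) k hk
    simp only [show ¬ ((0:Int) ≤ -1) by omega, if_false] at hmemL
    rw [← hL] at hmemL
    rw [← hR] at hmemR
    have hLub : L ≤ (k : Int) - j0 ∨ R ≤ (j0 : Int) - k := by
      by_cases h : j0 ≤ k
      · exact Or.inl (hL ▸ pvLeftScan_le (arr.length) arr 0 (-1) (by omega) (by omega) k j0 hk hj0 h hocc)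
      · exact Or.inr (hR ▸ pvRightScan_le (arr.length) arr 0 (by omega) k j0 hk hj0 (by omega) hocc)
    have hach : ∃ (j : Nat) (hj : j < arr.length), (arr[j]).isSome ∧ min L R = |(k : Int) - (j : Int)| := by
      rcases hmemL with ⟨j, hj, hjk, hs, hLe⟩ | hLn
      · rcases hmemR with ⟨j', hj', hkj', hs', hRe⟩ | hRn
        · rcases le_total L R with hmin | hmin
          · exact ⟨j, hj, hs, by rw [min_eq_left hmin, hLe, abs_of_nonneg (by omega)]⟩
          · exact ⟨j', hj', hs', by rw [min_eq_right hmin, hRe, abs_of_nonpos (by omega), neg_sub]⟩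
        · refine ⟨j, hj, hs, ?_⟩
          rw [min_eq_left (by rw [hLe, hRn]; omega), hLe, abs_of_nonneg (by omega)]
      · rcases hmemR with ⟨j', hj', hkj', hs', hRe⟩ | hRn
        · refine ⟨j', hj', hs', ?_⟩
          rw [min_eq_right (by rw [hLn, hRe]; omega), hRe, abs_of_nonpos (by omega), neg_sub]
        · exfalso
          rcases hLub with h | h
          · rw [hLn] at h; omega
          · rw [hRn] at h; omega
    obtain ⟨j, hj, hs, he⟩ := hach
    exact List.mem_map.mpr ⟨(j : Int), (mem_occ_iff arr _).mpr ⟨j, hj, hs, rfl⟩, he.symm⟩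
  · -- lower bound against every occupied index
    intro x hx
    obtain ⟨o, ho, rfl⟩ := List.mem_map.mp hx
    obtain ⟨j, hj, hs, rfl⟩ := (mem_occ_iff arr o).mp ho
    by_cases h : j ≤ k
    · have := pvLeftScan_le (arr.length) arr 0 (-1) (by omega) (by omega) k j hk hj h hs
      rw [← hL] at this
      rw [abs_of_nonneg (by omega)]
      exact le_trans (min_le_left L R) this
    · have := pvRightScan_le (arr.length) arr 0 (by omega) k j hk hj (by omega) hs
      rw [← hR] at this
      rw [abs_of_nonpos (by omega), neg_sub]
      exact le_trans (min_le_right L R) this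

-- the two final loops agree, related state by state
theorem pick_eq (occ : List Int) :
    ∀ (l : List (Option Int)) (ls rs : List Int) (i : Int) (sA : Int × Option Int) (sB : Int × Int),
    ∀ (hl : ls.length = l.length) (hr : rs.length = l.length),
    (∀ (k : Nat) (hk : k < l.length), (l[k]).isNone →
      PySem.List.min? (occ.map (fun o => |(i + (k : Int)) - o|)) (fun x => x)
        = some (min (ls[k]'(by rw [hl]; exact hk)) (rs[k]'(by rw [hr]; exact hk)))) →
    sA.1 = sB.1 → sB.2 = sA.2.getD 0 →
    (pvPick l ls rs i sB).1 = ((((PySem.List.enumerate l i).filter (fun p => p.2.isNone)).map (fun p => p.1)).foldl (fun (s : Int × Option Int) e =>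
      match PySem.List.min? (occ.map (fun o => |e - o|)) (fun x => x) with
      | some min_dist => if min_dist > s.1 then (min_dist, some e) else s
      | none => s) sA).1 ∧
    (pvPick l ls rs i sB).2 = ((((PySem.List.enumerate l i).filter (fun p => p.2.isNone)).map (fun p => p.1)).foldl (fun (s : Int × Option Int) e =>
      match PySem.List.min? (occ.map (fun o => |e - o|)) (fun x => x) with
      | some min_dist => if min_dist > s.1 then (min_dist, some e) else s
      | none => s) sA).2.getD 0 := by
  intro l
  induction l with
  | nil =>
    intro ls rs i sA sB hl hr hm h1 h2
    simp only [pvPick, PySem.List.enumerate_nil, List.filter_nil, List.map_nil, List.foldl_nil]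
    exact ⟨h1.symm, h2⟩
  | cons v vs ih =>
    intro ls rs i sA sB hl hr hm h1 h2
    cases ls with
    | nil => simp at hl
    | cons a ls' =>
    cases rs with
    | nil => simp at hr
    | cons b rs' =>
    have hm' : ∀ (k : Nat) (hk : k < vs.length), (vs[k]).isNone →
        PySem.List.min? (occ.map (fun o => |((i + 1) + (k : Int)) - o|)) (fun x => x)
          = some (min (ls'[k]'(by simp at hl; omega)) (rs'[k]'(by simp at hr; omega))) := by
      intro k hk hn
      have h := hm (k+1) (by simpa using hk) (by simpa using hn)
      have e : i + ((k : Nat) + 1 : Int) = (i + 1) + (k : Int) := by ring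
      push_cast at h
      rw [e] at h
      simpa using h
    rw [PySem.List.enumerate_cons]
    by_cases hv : v.isNone
    · have hm0 := hm 0 (by simp) (by simpa using hv)
      simp only [Nat.cast_zero, add_zero, List.getElem_cons_zero] at hm0
      simp only [List.filter_cons, hv, if_true, decide_true, List.map_cons, List.foldl_cons]
      rw [hm0]
      simp only [pvPick, hv, if_true]
      obtain ⟨d, o⟩ := sA
      obtain ⟨d', b2⟩ := sB
      simp only at h1 h2 ⊢
      subst h1
      by_cases hgt : min a b > d
      · rw [if_pos hgt, if_pos hgt]
        exact ih ls' rs' (i+1) (min a b, some i) (min a b, i) (by simp at hl; omega) (by simp at hr; omega) hm' rfl rfl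
      · rw [if_neg hgt, if_neg hgt]
        exact ih ls' rs' (i+1) (d, o) (d, b2) (by simp at hl; omega) (by simp at hr; omega) hm' rfl h2
    · simp only [List.filter_cons, hv, decide_false, Bool.false_eq_true, if_false]
      simp only [pvPick, hv, Bool.false_eq_true, if_false]
      exact ih ls' rs' (i+1) sA sB (by simp at hl; omega) (by simp at hr; omega) hm' h1 h2

theorem emp_nil (arr : List (Option Int)) :
    (((PySem.List.enumerate arr).filter (fun p => p.2.isNone)).map (fun p => p.1)) = [] ↔ ∀ v ∈ arr, v.isSome := by
  simp only [List.map_eq_nil_iff, List.filter_eq_nil_iff]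
  constructor
  · intro h v hv
    have hm : v ∈ (PySem.List.enumerate arr).map (fun p => p.2) := by
      rw [PySem.List.map_snd_enumerate]; exact hv
    obtain ⟨p, hp, rfl⟩ := List.mem_map.mp hm
    have := h p hp
    cases hv2 : p.2 <;> simp_all
  · intro h p hp
    have h2 : p.2 ∈ arr := by
      rw [← PySem.List.map_snd_enumerate arr (0 : Int)]
      exact List.mem_map.mpr ⟨p, hp, rfl⟩
    have hv := h p.2 h2
    cases hv3 : p.2 with
    | none => rw [hv3] at hv; simp at hv
    | some x => simp [hv3]

theorem occ_nil (arr : List (Option Int)) :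
    (((PySem.List.enumerate arr).filter (fun p => p.2.isSome)).map (fun p => p.1)) = [] ↔ ∀ v ∈ arr, v.isNone := by
  simp only [List.map_eq_nil_iff, List.filter_eq_nil_iff]
  constructor
  · intro h v hv
    have hm : v ∈ (PySem.List.enumerate arr).map (fun p => p.2) := by
      rw [PySem.List.map_snd_enumerate]; exact hv
    obtain ⟨p, hp, rfl⟩ := List.mem_map.mp hm
    have := h p hp
    cases hv2 : p.2 <;> simp_all
  · intro h p hp
    have h2 : p.2 ∈ arr := by
      rw [← PySem.List.map_snd_enumerate arr (0 : Int)]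
      exact List.mem_map.mpr ⟨p, hp, rfl⟩
    have hv := h p.2 h2
    cases hv3 : p.2 with
    | none => simp [hv3]
    | some x => rw [hv3] at hv; simp at hv

-- ===== VERDICT (by name: the statement is the Claim_ definition above) =====
theorem farthest_empty_index_spec : Claim_equal_farthest_empty_index := by
  intro arr _
  unfold Spec_farthest_empty_index farthest_empty_index farthest_empty_index_alt
  simp only []
  by_cases hA : (arr.all (fun v => v.isNone) || arr.all (fun v => v.isSome)) = true
  · -- degenerate: no empty slot or no occupied slot; both return 0
    rw [if_pos hA]
    rcases Bool.or_eq_true_iff.mp hA with h | h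
    · have : (((PySem.List.enumerate arr).filter (fun p => p.2.isSome)).map (fun p => p.1)).isEmpty = true := by
        rw [List.isEmpty_iff, occ_nil]
        intro v hv; exact List.all_eq_true.mp h v hv
      rw [if_pos (by rw [this]; simp)]
    · have : (((PySem.List.enumerate arr).filter (fun p => p.2.isNone)).map (fun p => p.1)).isEmpty = true := by
        rw [List.isEmpty_iff, emp_nil]
        intro v hv; exact List.all_eq_true.mp h v hv
      rw [if_pos (by rw [this]; simp)]
  · rw [if_neg hA]
    have hA' := Bool.or_eq_false_iff.mp (Bool.eq_false_iff.mpr hA)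
    obtain ⟨hno, hns⟩ := hA'
    -- some occupied slot exists
    obtain ⟨vo, hvo, hvo'⟩ := List.all_eq_false.mp hno
    obtain ⟨j0, hj0, rfl⟩ := List.mem_iff_getElem.mp hvo
    have hocc0 : (arr[j0]).isSome := by cases h : arr[j0] <;> simp_all
    -- some empty slot exists
    obtain ⟨ve, hve, hve'⟩ := List.all_eq_false.mp hns
    have hempB : (((PySem.List.enumerate arr).filter (fun p => p.2.isNone)).map (fun p => p.1)).isEmpty = false := by
      rw [List.isEmpty_eq_false_iff, Ne, emp_nil]
      intro h; exact hve' (h ve hve)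
    have hoccB : (((PySem.List.enumerate arr).filter (fun p => p.2.isSome)).map (fun p => p.1)).isEmpty = false := by
      rw [List.isEmpty_eq_false_iff, Ne, occ_nil]
      intro h
      have := h arr[j0] (List.getElem_mem hj0)
      cases hx : arr[j0] <;> simp_all
    rw [if_neg (by rw [hempB, hoccB]; simp)]
    have hpick := pick_eq (((PySem.List.enumerate arr).filter (fun p => p.2.isSome)).map (fun p => p.1))
      arr (pvLeftScan (arr.length) arr 0 (-1)) ((pvRightScan (arr.length) arr 0).1) 0
      ((-1 : Int), (none : Option Int)) ((-1 : Int), (0 : Int))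
      (pvLeftScan_length _ _ _ _) (pvRightScan_length _ _ _)
      (fun k hk hn => by
        have := mind_eq arr k hk j0 hj0 hocc0
        simpa using this)
      rfl rfl
    rw [hpick.2]
    cases ((((PySem.List.enumerate arr).filter (fun p => p.2.isNone)).map (fun p => p.1)).foldl (fun (s : Int × Option Int) e =>
      match PySem.List.min? ((((PySem.List.enumerate arr).filter (fun p => p.2.isSome)).map (fun p => p.1)).map (fun o => |e - o|)) (fun x => x) with
      | some min_dist => if min_dist > s.1 then (min_dist, some e) else s
      | none => s) ((-1 : Int), (none : Option Int))).2 <;> rfl
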